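-- pv_equiv track=rewrite | github.com/thehimel/hackerrank-python | src/no_idea.py | solution
-- ===== SOURCE A (Python) =====
-- def convert(destination, source):
--     for item in source:
--         if item.isnumeric():
--             destination[item] = '_'
--
-- def solution(two, three, four):
--     likes = dict()
--     convert(likes, three)
--
--     dislikes = dict()
--     convert(dislikes, four)
--
--     happiness = 0
--
--     for choice in two:
--         if choice.isnumeric():
--             try:
--                 if likes[choice]:
--                     happiness += 1
--             except Exception:
--                 try:
--                     if dislikes[choice]:
--                         happiness -= 1
--                 except Exception:
--                     pass
--
--     return happiness
-- ===== SOURCE B (Python) =====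
-- def solution(two, three, four):
--     count = {}
--     for c in two:
--         if c.isnumeric():
--             count[c] = count.get(c, 0) + 1
--     likes = {x for x in three if x.isnumeric()}
--     dislikes = {x for x in four if x.isnumeric()}
--     return (sum(count.get(x, 0) for x in likes)
--             - sum(count.get(x, 0) for x in dislikes - likes))
-- ===== Notes on version B (the rewrite author's own statement) =====
-- stated objective: alternative
-- what changed: Inverts the traversal: instead of A's per-choice probing of two membership dicts via nested try/except, B counts the numeric choices once into a multiplicity table and then sums those multiplicities over the like set and the dislike-minus-like set, returning the difference.
import Mathlib
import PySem

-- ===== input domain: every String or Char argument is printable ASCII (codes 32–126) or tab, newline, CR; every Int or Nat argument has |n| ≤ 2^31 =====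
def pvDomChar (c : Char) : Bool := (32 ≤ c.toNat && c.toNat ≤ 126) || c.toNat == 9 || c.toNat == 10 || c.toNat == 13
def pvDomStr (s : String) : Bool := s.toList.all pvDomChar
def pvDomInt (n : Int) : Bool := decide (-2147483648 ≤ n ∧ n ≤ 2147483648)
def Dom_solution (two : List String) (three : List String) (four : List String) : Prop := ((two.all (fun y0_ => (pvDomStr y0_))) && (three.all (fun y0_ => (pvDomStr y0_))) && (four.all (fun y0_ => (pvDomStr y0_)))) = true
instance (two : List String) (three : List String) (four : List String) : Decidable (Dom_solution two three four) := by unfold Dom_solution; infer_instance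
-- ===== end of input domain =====

-- B inverts A's traversal: instead of probing like/dislike tables once per choice,
-- it counts the numeric choices once and sums those multiplicities over the like set
-- and the dislike-minus-like set (objective: alternative; same exact result).
-- str.isnumeric is ported as PySem.Str.strIsdigit, exact on the printable-ASCII domain Dom_solution.

-- ===== PORT A =====
def convertA (destination : PySem.Dict String String) (source : List String) :
    PySem.Dict String String :=
  source.foldl (fun d item =>
    if PySem.Str.strIsdigit item then d.insert item "_" else d) destination

def solution (two : List String) (three : List String) (four : List String) : Int :=
  let likes := convertA PySem.Dict.empty three
  let dislikes := convertA PySem.Dict.empty four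
  two.foldl (fun happiness choice =>
    if PySem.Str.strIsdigit choice then
      match likes.get? choice with
      | some v => if v ≠ "" then happiness + 1 else happiness
      | none =>
        match dislikes.get? choice with
        | some v => if v ≠ "" then happiness - 1 else happiness
        | none => happiness
    else happiness) 0

-- ===== PORT B =====
def solution_alt (two : List String) (three : List String) (four : List String) : Int :=
  let count := two.foldl (fun d c =>
    if PySem.Str.strIsdigit c then d.insert c (d.getD c 0 + 1) else d)
    (PySem.Dict.empty : PySem.Dict String Int)
  let likes : PySem.Set String :=
    PySem.Set.ofList (three.filter (fun x => PySem.Str.strIsdigit x))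
  let dislikes : PySem.Set String :=
    PySem.Set.ofList (four.filter (fun x => PySem.Str.strIsdigit x))
  (likes.map (fun x => count.getD x 0)).sum
    - ((PySem.Set.diff dislikes likes).map (fun x => count.getD x 0)).sum

-- ===== PRECONDITION & SPEC =====
def Spec_solution (two : List String) (three : List String) (four : List String) (out : Int) : Prop := out = solution_alt two three four
instance (two : List String) (three : List String) (four : List String) (out : Int) : Decidable (Spec_solution two three four out) := by unfold Spec_solution; infer_instance

-- ===== CLAIM =====
def Claim_equal_solution : Prop := ∀ (two : List String) (three : List String) (four : List String), Dom_solution two three four → Spec_solution two three four (solution two three four)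

-- ===== LEMMAS AND PROOFS =====

-- A's dict built by convertA: key present iff it is a numeric element of the source, value "_".
lemma convertA_get? (source : List String) (d : PySem.Dict String String) (c : String) :
    (convertA d source).get? c =
      if c ∈ source.filter (fun x => PySem.Str.strIsdigit x) then some "_" else d.get? c := by
  induction source generalizing d with
  | nil => simp [convertA]
  | cons x xs ih =>
    simp only [convertA, List.foldl_cons] at *
    rw [ih]
    by_cases hm : c ∈ xs.filter (fun x => PySem.Str.strIsdigit x)
    · have hmem : c ∈ (x :: xs).filter (fun x => PySem.Str.strIsdigit x) := by
        rw [List.filter_cons]; split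
        · exact List.mem_cons_of_mem _ hm
        · exact hm
      rw [if_pos hm, if_pos hmem]
    · rw [if_neg hm]
      by_cases hx : PySem.Str.strIsdigit x
      · rw [if_pos hx, PySem.Dict.get?_insert]
        by_cases hcx : c = x
        · subst hcx
          have hmem : c ∈ (c :: xs).filter (fun x => PySem.Str.strIsdigit x) := by
            rw [List.filter_cons_of_pos hx]; exact List.mem_cons_self
          rw [if_pos rfl, if_pos hmem]
        · have hnm : c ∉ (x :: xs).filter (fun x => PySem.Str.strIsdigit x) := by
            rw [List.filter_cons_of_pos hx]
            intro h
            rcases List.mem_cons.mp h with h | h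
            · exact hcx h
            · exact hm h
          rw [if_neg hcx, if_neg hnm]
      · rw [if_neg hx]
        have hnm : c ∉ (x :: xs).filter (fun x => PySem.Str.strIsdigit x) := by
          rw [List.filter_cons_of_neg hx]; exact hm
        rw [if_neg hnm]

-- indicator sum over a duplicate-free list
lemma sum_indicator (L : List String) (hL : L.Nodup) (c : String) :
    (L.map (fun x => if c = x then (1 : Int) else 0)).sum = if c ∈ L then 1 else 0 := by
  induction L with
  | nil => simp
  | cons y ys ih =>
    rcases List.nodup_cons.mp hL with ⟨hy, hys⟩
    by_cases hcy : c = y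
    · subst hcy
      simp [ih hys, hy]
    · simp only [List.map_cons, List.sum_cons, if_neg hcy, ih hys, List.mem_cons]
      simp [hcy]

-- The central identity: a difference of multiplicity sums over the (disjoint, duplicate-free)
-- like set and dislike-only set equals the signed per-element sum A accumulates.
lemma sum_counts_eq (L D' : List String) (hL : L.Nodup) (hD : D'.Nodup)
    (hdisj : ∀ x ∈ D', x ∉ L) (l : List String) :
    (L.map (fun x => ((l.count x : Nat) : Int))).sum
      - (D'.map (fun x => ((l.count x : Nat) : Int))).sum
    = (l.map (fun c => if c ∈ L then (1 : Int) else if c ∈ D' then -1 else 0)).sum := by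
  induction l with
  | nil => simp
  | cons c cs ih =>
    have hcount : ∀ (M : List String), M.Nodup →
        (M.map (fun x => (((c :: cs).count x : Nat) : Int))).sum
        = (M.map (fun x => ((cs.count x : Nat) : Int))).sum + (if c ∈ M then 1 else 0) := by
      intro M hM
      have hmm : (M.map (fun x => (((c :: cs).count x : Nat) : Int))).sum
          = (M.map (fun x => ((cs.count x : Nat) : Int) + (if c = x then (1 : Int) else 0))).sum := by
        congr 1
        apply List.map_congr_left
        intro x _
        by_cases hxc : x = c
        · subst hxc; simp
        · have h2 : ¬ c = x := fun h => hxc h.symm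
          simp [h2]
      rw [hmm, List.sum_map_add, sum_indicator M hM c]
    rw [hcount L hL, hcount D' hD, List.map_cons, List.sum_cons, ← ih]
    by_cases hcL : c ∈ L
    · have hnd : c ∉ D' := fun h => hdisj c h hcL
      simp only [if_pos hcL, if_neg hnd]
      ring
    · by_cases hcD : c ∈ D'
      · simp only [if_neg hcL, if_pos hcD]
        ring
      · simp only [if_neg hcL, if_neg hcD]
        ring

-- A's main loop written as a signed sum over the numeric choices.
lemma solution_eq_sum (two three four : List String) :
    solution two three four
    = ((two.filter (fun c => PySem.Str.strIsdigit c)).map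
        (fun c => if c ∈ three.filter (fun x => PySem.Str.strIsdigit x) then (1 : Int)
          else if c ∈ four.filter (fun x => PySem.Str.strIsdigit x) then -1 else 0)).sum := by
  unfold solution
  have hfun : (fun (happiness : Int) (choice : String) =>
      if PySem.Str.strIsdigit choice then
        match (convertA PySem.Dict.empty three).get? choice with
        | some v => if v ≠ "" then happiness + 1 else happiness
        | none =>
          match (convertA PySem.Dict.empty four).get? choice with
          | some v => if v ≠ "" then happiness - 1 else happiness
          | none => happiness
      else happiness)
      = (fun (h : Int) (c : String) =>
          if PySem.Str.strIsdigit c then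
            h + (if c ∈ three.filter (fun x => PySem.Str.strIsdigit x) then (1 : Int)
              else if c ∈ four.filter (fun x => PySem.Str.strIsdigit x) then -1 else 0)
          else h) := by
    funext h c
    by_cases hd : PySem.Str.strIsdigit c
    · rw [if_pos hd, if_pos hd, convertA_get?, convertA_get?]
      by_cases h3 : c ∈ three.filter (fun x => PySem.Str.strIsdigit x)
      · rw [if_pos h3, if_pos h3]; simp
      · rw [if_neg h3, if_neg h3, PySem.Dict.get?_empty]
        by_cases h4 : c ∈ four.filter (fun x => PySem.Str.strIsdigit x)
        · rw [if_pos h4, if_pos h4]; simp [sub_eq_add_neg]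
        · rw [if_neg h4, if_neg h4]; simp
    · rw [if_neg hd, if_neg hd]
  dsimp only
  rw [hfun, ← List.foldl_filter (p := fun c => PySem.Str.strIsdigit c), PySem.List.foldl_add]
  simp

-- ===== VERDICT =====
theorem solution_spec : Claim_equal_solution := by
  intro two three four _
  unfold Spec_solution solution_alt
  dsimp only
  rw [solution_eq_sum]
  have hcnt : ∀ x : String, (two.foldl (fun d c =>
      if PySem.Str.strIsdigit c then d.insert c (d.getD c 0 + 1) else d)
      (PySem.Dict.empty : PySem.Dict String Int)).getD x 0
      = (((two.filter (fun c => PySem.Str.strIsdigit c)).count x : Nat) : Int) := by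
    intro x
    rw [← List.foldl_filter (p := fun c => PySem.Str.strIsdigit c),
      PySem.Dict.getD_foldl_insert_add_one, PySem.Dict.getD_empty, zero_add]
  have hmap : ∀ (M : List String), (M.map (fun x => (two.foldl (fun d c =>
      if PySem.Str.strIsdigit c then d.insert c (d.getD c 0 + 1) else d)
      (PySem.Dict.empty : PySem.Dict String Int)).getD x 0))
      = M.map (fun x => (((two.filter (fun c => PySem.Str.strIsdigit c)).count x : Nat) : Int)) := by
    intro M
    apply List.map_congr_left
    intro x _
    exact hcnt x
  rw [hmap, hmap]
  rw [sum_counts_eq _ _ (PySem.Set.nodup_ofList _)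
    (PySem.Set.nodup_diff _ _ (PySem.Set.nodup_ofList _))
    (fun x hx => ((PySem.Set.mem_diff _ _ _).mp hx).2)
    (two.filter (fun c => PySem.Str.strIsdigit c))]
  apply congrArg List.sum
  apply List.map_congr_left
  intro c _
  by_cases h3 : c ∈ three.filter (fun x => PySem.Str.strIsdigit x)
  · have : c ∈ PySem.Set.ofList (three.filter (fun x => PySem.Str.strIsdigit x)) :=
      (PySem.Set.mem_ofList _ _).mpr h3
    rw [if_pos h3, if_pos this]
  · have hno : c ∉ PySem.Set.ofList (three.filter (fun x => PySem.Str.strIsdigit x)) :=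
      fun h => h3 ((PySem.Set.mem_ofList _ _).mp h)
    rw [if_neg h3, if_neg hno]
    by_cases h4 : c ∈ four.filter (fun x => PySem.Str.strIsdigit x)
    · have : c ∈ PySem.Set.diff (PySem.Set.ofList (four.filter (fun x => PySem.Str.strIsdigit x)))
          (PySem.Set.ofList (three.filter (fun x => PySem.Str.strIsdigit x))) :=
        (PySem.Set.mem_diff _ _ _).mpr ⟨(PySem.Set.mem_ofList _ _).mpr h4, hno⟩
      rw [if_pos h4, if_pos this]
    · have : c ∉ PySem.Set.diff (PySem.Set.ofList (four.filter (fun x => PySem.Str.strIsdigit x)))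
          (PySem.Set.ofList (three.filter (fun x => PySem.Str.strIsdigit x))) := by
        intro h
        exact h4 ((PySem.Set.mem_ofList _ _).mp ((PySem.Set.mem_diff _ _ _).mp h).1)
      rw [if_neg h4, if_neg this]
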